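-- pv_equiv track=rewrite | github.com/strinsberg/competitive-programming | codeforces/contests/c_618/ctest.py | solve
-- ===== SOURCE A (Python) =====
-- def is_on(i, x):
--   return (x >> i) & 1 == 1
--
-- def times_is_on(i, A):
--   ans = 0
--   for x in A:
--     ans += is_on(i, x)
--   return ans
--
-- def get_msb(x):
--   n = x + 0
--   ans = 0
--   while n > 0:
--     n = n >> 1
--     ans +=1
--   return ans - 1
--
-- def solve(A):
--   mx = max(A)
--   msb = get_msb(mx)
--
--   bit = 0
--   while (msb >= 0):
--     if times_is_on(msb, A) == 1:
--       bit = msb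
--       break
--     msb -= 1
--
--   if bit != 0:
--     for x in A:
--       if is_on(bit, x):
--         A.remove(x)
--         A.insert(0,x)
--   return A
-- ===== SOURCE B (Python) =====
-- # B: one-pass bit histogram + direct pop/insert move (alternative decomposition; mutates A like the original).
-- def solve(A):
--   mx = max(A)
--   if mx > 0:
--     n = mx.bit_length()
--     counts = [0] * n
--     for x in A:
--       counts = [c + ((x >> b) & 1) for b, c in enumerate(counts)]
--     bit = next((b for b in range(n - 1, 0, -1) if counts[b] == 1), 0)
--     if bit != 0:
--       j = next(i for i, x in enumerate(A) if (x >> bit) & 1)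
--       A.insert(0, A.pop(j))
--   return A
-- ===== Notes on version B (the rewrite author's own statement) =====
-- stated objective: alternative
-- what changed: Replaces A's top-down per-bit rescans (times_is_on over the whole list for each candidate bit) by a single histogram pass that counts every bit of every element at once, and replaces A's mutate-while-iterating remove/insert loop by computing the index of the unique holder and doing one pop/insert.
import Mathlib
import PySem

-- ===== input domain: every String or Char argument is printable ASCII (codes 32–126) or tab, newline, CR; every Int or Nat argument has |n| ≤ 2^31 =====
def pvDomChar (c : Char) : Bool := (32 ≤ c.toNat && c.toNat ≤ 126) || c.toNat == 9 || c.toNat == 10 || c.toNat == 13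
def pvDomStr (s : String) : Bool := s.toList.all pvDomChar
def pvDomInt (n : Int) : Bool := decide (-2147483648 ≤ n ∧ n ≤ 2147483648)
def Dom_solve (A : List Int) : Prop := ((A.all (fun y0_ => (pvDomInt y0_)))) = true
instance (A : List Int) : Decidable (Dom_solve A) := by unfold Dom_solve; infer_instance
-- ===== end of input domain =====

-- B replaces A's per-bit rescan by a one-pass bit histogram and the mutating remove/insert loop by a
-- direct find-index + pop/insert move; equivalence is about the RETURN value (both Pythons mutate A alike).

-- ===== PORT A =====
-- is_on(i, x): (x >> i) & 1 == 1  (shift amounts are ≥ 0 at every call site: msb counts down to 0)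
def pvIsOn (i : Int) (x : Int) : Bool := PySem.Int.band (x >>> i.toNat) 1 == 1

-- times_is_on(i, A): ans += is_on(i, x)  (bool added as 0/1)
def pvTimesIsOn (i : Int) (A : List Int) : Int :=
  A.foldl (fun ans x => ans + (if pvIsOn i x then 1 else 0)) 0

-- get_msb's while loop: n, ans
def pvMsbLoop (n : Int) (ans : Int) : Int :=
  if 0 < n then pvMsbLoop (n >>> (1:Nat)) (ans + 1) else ans
  termination_by n.toNat
  decreasing_by simp only [Int.shiftRight_eq_div_pow, pow_one, Nat.cast_ofNat]; omega

def pvGetMsb (x : Int) : Int := pvMsbLoop (x + 0) 0 - 1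

-- the 'while msb >= 0' search for the highest bit set in exactly one element ('bit' starts at 0)
def pvBitLoop (A : List Int) (msb : Int) : Int :=
  if 0 ≤ msb then
    if pvTimesIsOn msb A == 1 then msb else pvBitLoop A (msb - 1)
  else 0
  termination_by (msb + 1).toNat
  decreasing_by omega

-- 'for x in A: if is_on(bit, x): A.remove(x); A.insert(0, x)' — Python's for runs on an internal
-- index over the list being mutated; i is that index (remove of a present element keeps the length).
def pvMoveLoop (bit : Int) (A : List Int) (i : Nat) : List Int :=
  if h : i < A.length then
    if pvIsOn bit A[i] then
      pvMoveLoop bit (PySem.List.insert ((PySem.List.remove? A A[i]).getD A) 0 A[i]) (i + 1)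
    else pvMoveLoop bit A (i + 1)
  else A
  termination_by A.length - i
  decreasing_by
  · rw [PySem.List.remove?_eq_some_erase A A[i] (List.getElem_mem h)]
    simp [PySem.List.insert_zero, List.length_erase_of_mem (List.getElem_mem h)]
    omega
  · omega

def solve (A : List Int) : List Int :=
  match PySem.List.max? A (fun y => y) with
  | none => A          -- max([]) raises ValueError: excluded by Pre_solve
  | some mx =>
    let msb := pvGetMsb mx
    let bit := pvBitLoop A msb
    if bit ≠ 0 then pvMoveLoop bit A 0 else A

-- ===== PORT B =====
def solve_alt (A : List Int) : List Int :=
  match PySem.List.max? A (fun y => y) with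
  | none => A          -- max([]) raises ValueError: excluded by Pre_solve
  | some mx =>
    if 0 < mx then
      let n : Nat := PySem.Int.bitLength mx
      -- counts = [c + ((x >> b) & 1) for b, c in enumerate(counts)], folded over A
      let counts : List Int :=
        A.foldl (fun c (x : Int) =>
          (PySem.List.enumerate c).map (fun p : Int × Int => p.2 + PySem.Int.band (x >>> p.1.toNat) 1))
          (List.replicate n (0:Int))
      -- bit = next((b for b in range(n-1, 0, -1) if counts[b] == 1), 0)
      let bit : Int :=
        ((PySem.List.pyRange ((n : Int) - 1) 0 (-1)).find?
          (fun b => PySem.List.pyGetD counts b 0 == 1)).getD 0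
      if bit ≠ 0 then
        -- j = next(i for i, x in enumerate(A) if (x >> bit) & 1); A.insert(0, A.pop(j))
        match (PySem.List.enumerate A).find? (fun p : Int × Int => PySem.Int.band (p.2 >>> bit.toNat) 1 != 0) with
        | some jx =>
          match PySem.List.pop? A jx.1 with
          | some xr => PySem.List.insert xr.2 0 xr.1
          | none => A   -- unreachable: jx.1 is an in-range index of A
        | none => A      -- unreachable when bit ≠ 0: that bit is set in exactly one element
      else A
    else A

-- ===== PRECONDITION & SPEC =====
-- Pre_ excludes only the empty list, on which A's max(A) raises ValueError.
def Pre_solve (A : List Int) : Prop := A ≠ []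
instance (A : List Int) : Decidable (Pre_solve A) := by unfold Pre_solve; infer_instance
def pvWitness_solve : List Int := [5, 3]

def Spec_solve (A : List Int) (out : List Int) : Prop := out = solve_alt A
instance (A : List Int) (out : List Int) : Decidable (Spec_solve A out) := by unfold Spec_solve; infer_instance

-- ===== CLAIM (what is proved, stated in full; the proofs are below) =====
def Claim_equal_solve : Prop := ∀ (A : List Int), Dom_solve A → Pre_solve A → Spec_solve A (solve A)

-- ===== LEMMAS AND PROOFS =====

theorem pv_shift_one (n : Int) : n >>> (1:Nat) = PySem.Int.floordiv n 2 := by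
  rw [PySem.Int.floordiv_eq_ediv_of_pos (by norm_num), Int.shiftRight_eq_div_pow]; norm_num

theorem pv_band01 (a : Int) : PySem.Int.band a 1 = 0 ∨ PySem.Int.band a 1 = 1 := by
  rw [PySem.Int.band_one]
  have h1 := PySem.Int.mod_nonneg a (show (0:Int) < 2 by norm_num)
  have h2 := PySem.Int.mod_lt a (show (0:Int) < 2 by norm_num)
  omega

theorem pvMsbLoop_nonpos (n a : Int) (h : n ≤ 0) : pvMsbLoop n a = a := by
  rw [pvMsbLoop, if_neg (by omega)]

theorem pvMsbLoop_eq (n a : Int) (h : 0 < n) :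
    pvMsbLoop n a = a + (PySem.Int.bitLength n : Int) := by
  rw [pvMsbLoop, if_pos h, pv_shift_one, PySem.Int.bitLength_of_pos h]
  have hfd : PySem.Int.floordiv n 2 = n / 2 := PySem.Int.floordiv_eq_ediv_of_pos (by norm_num)
  by_cases h2 : 0 < PySem.Int.floordiv n 2
  · rw [pvMsbLoop_eq (PySem.Int.floordiv n 2) (a + 1) h2]
    push_cast; ring
  · have hz : PySem.Int.floordiv n 2 = 0 := by omega
    rw [pvMsbLoop_nonpos _ _ (by omega), hz]
    simp only [PySem.Int.bitLength_zero]
    push_cast; ring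
  termination_by n.toNat
  decreasing_by
    rw [hfd] at h2 ⊢
    omega

theorem pvGetMsb_nonpos (mx : Int) (h : mx ≤ 0) : pvGetMsb mx = -1 := by
  rw [pvGetMsb, pvMsbLoop_nonpos _ _ (by omega)]
  norm_num

theorem pvGetMsb_eq (mx : Int) (h : 0 < mx) :
    pvGetMsb mx = (PySem.Int.bitLength mx : Int) - 1 := by
  rw [pvGetMsb, show mx + 0 = mx by ring, pvMsbLoop_eq mx 0 h]
  ring

theorem pvTimes_aux (b : Int) (l : List Int) (a : Int) :
    l.foldl (fun acc x => acc + (if pvIsOn b x then 1 else 0)) a = a + (l.countP (pvIsOn b) : Int) := by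
  induction l generalizing a with
  | nil => simp
  | cons y l ih =>
    rw [List.foldl_cons, ih, List.countP_cons]
    split <;> push_cast <;> ring

theorem pvTimesIsOn_eq (b : Int) (A : List Int) :
    pvTimesIsOn b A = (A.countP (pvIsOn b) : Int) := by
  unfold pvTimesIsOn
  rw [pvTimes_aux]
  simp

theorem pvBitLoop_spec (A : List Int) (m : Int) (h : pvBitLoop A m ≠ 0) :
    A.countP (pvIsOn (pvBitLoop A m)) = 1 := by
  by_cases hm : 0 ≤ m
  · rw [pvBitLoop, if_pos hm] at h ⊢
    by_cases ht : pvTimesIsOn m A == 1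
    · rw [if_pos ht] at h ⊢
      have := beq_iff_eq.mp ht
      rw [pvTimesIsOn_eq] at this
      exact_mod_cast this
    · rw [if_neg ht] at h ⊢
      exact pvBitLoop_spec A (m - 1) h
  · rw [pvBitLoop, if_neg hm] at h
    exact absurd rfl h
  termination_by (m + 1).toNat
  decreasing_by omega

theorem pv_find?_congr {α : Type} (l : List α) (p q : α → Bool)
    (h : ∀ b ∈ l, p b = q b) : l.find? p = l.find? q := by
  induction l with
  | nil => rfl
  | cons a l ih =>
    have ha := h a (by simp)
    have ih' := ih (fun b hb => h b (by simp [hb]))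
    cases hq : q a
    · rw [List.find?_cons_of_neg (by simp [ha, hq]), List.find?_cons_of_neg (by simp [hq]), ih']
    · rw [List.find?_cons_of_pos (by simp [ha, hq]), List.find?_cons_of_pos hq]

theorem pvBitLoop_eq_find (A : List Int) (m : Int) :
    pvBitLoop A m =
      ((PySem.List.pyRange m 0 (-1)).find? (fun b => pvTimesIsOn b A == 1)).getD 0 := by
  by_cases hm : 0 ≤ m
  · rw [pvBitLoop, if_pos hm]
    by_cases hm0 : m = 0
    · subst hm0
      rw [PySem.List.pyRange_neg_one_eq_nil (le_refl 0)]
      split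
      · rfl
      · rw [pvBitLoop, if_neg (by norm_num)]; rfl
    · have hmpos : (0:Int) < m := by omega
      rw [PySem.List.pyRange_neg_one_cons hmpos]
      by_cases ht : pvTimesIsOn m A == 1
      · rw [if_pos ht,
          List.find?_cons_of_pos (p := fun b => pvTimesIsOn b A == 1) (by simpa using ht)]
        rfl
      · rw [if_neg ht,
          List.find?_cons_of_neg (p := fun b => pvTimesIsOn b A == 1) (by simpa using ht)]
        exact pvBitLoop_eq_find A (m - 1)
  · rw [pvBitLoop, if_neg hm, PySem.List.pyRange_neg_one_eq_nil (by omega)]; rfl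
  termination_by (m + 1).toNat
  decreasing_by omega

-- the histogram step (definitionally the fold body of solve_alt's counts) and its pointwise behaviour
def pvHStep (x : Int) (c : List Int) : List Int :=
  (PySem.List.enumerate c).map (fun p : Int × Int => p.2 + PySem.Int.band (x >>> p.1.toNat) 1)

theorem pvHist_get (x : Int) (cs : List Int) (k : Nat) :
    (pvHStep x cs)[k]? = Option.map (fun v => v + PySem.Int.band (x >>> k) 1) cs[k]? := by
  unfold pvHStep
  rw [List.getElem?_map, PySem.List.getElem?_enumerate]
  cases cs[k]? <;> simp

theorem pvHist_length (x : Int) (cs : List Int) : (pvHStep x cs).length = cs.length := by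
  unfold pvHStep
  rw [List.length_map, PySem.List.length_enumerate]

theorem pvHist_fold_length (l : List Int) (cs : List Int) :
    (l.foldl (fun acc x => pvHStep x acc) cs).length = cs.length := by
  induction l generalizing cs with
  | nil => rfl
  | cons x l ih => rw [List.foldl_cons, ih, pvHist_length]

theorem pvHist_fold_get (l : List Int) (cs : List Int) (k : Nat) :
    (l.foldl (fun acc x => pvHStep x acc) cs)[k]? =
      Option.map (fun v => v + ((l.countP (fun x : Int => PySem.Int.band (x >>> k) 1 == 1) : Nat) : Int)) cs[k]? := by
  induction l generalizing cs with
  | nil => cases hc : cs[k]? <;> simp [hc]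
  | cons x l ih =>
    rw [List.foldl_cons, ih, pvHist_get, List.countP_cons]
    cases hc : cs[k]? with
    | none => simp
    | some v =>
      simp only [Option.map_some, Option.some.injEq]
      rcases pv_band01 (x >>> k) with hb | hb <;> simp [hb] <;> omega

theorem pv_countP_eq_one {α : Type} (p : α → Bool) (A : List α) (h : A.countP p = 1) :
    ∃ l₁ x l₂, A = l₁ ++ x :: l₂ ∧ (∀ y ∈ l₁, p y = false) ∧ p x = true ∧
      (∀ y ∈ l₂, p y = false) := by
  induction A with
  | nil => simp at h
  | cons a A ih =>
    rw [List.countP_cons] at h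
    by_cases ha : p a
    · rw [if_pos ha] at h
      have h0 : A.countP p = 0 := by omega
      refine ⟨[], a, A, by simp, by simp, ha, ?_⟩
      intro y hy
      have := List.countP_eq_zero.mp h0 y hy
      simpa using this
    · rw [if_neg ha] at h
      obtain ⟨l₁, x, l₂, hA, h1, hx, h2⟩ := ih (by omega)
      exact ⟨a :: l₁, x, l₂, by simp [hA], by
        intro y hy
        rcases List.mem_cons.mp hy with rfl | hy
        · simpa using ha
        · exact h1 y hy, hx, h2⟩

theorem pv_find_enum (q : Int → Bool) (l₁ : List Int) (x : Int) (l₂ : List Int) (s : Int)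
    (h1 : ∀ y ∈ l₁, q y = false) (hx : q x = true) :
    (PySem.List.enumerate (l₁ ++ x :: l₂) s).find? (fun p => q p.2) =
      some (s + l₁.length, x) := by
  induction l₁ generalizing s with
  | nil =>
    rw [List.nil_append, PySem.List.enumerate_cons, List.find?_cons_of_pos (by simpa using hx)]
    simp
  | cons a l₁ ih =>
    rw [List.cons_append, PySem.List.enumerate_cons,
      List.find?_cons_of_neg (by simpa using h1 a (by simp)),
      ih (s + 1) (fun y hy => h1 y (List.mem_cons_of_mem a hy))]
    simp only [List.length_cons, Option.some.injEq, Prod.mk.injEq, and_true]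
    push_cast
    ring

theorem pvMoveLoop_id (bit : Int) (L : List Int) (i : Nat)
    (h : ∀ (k : Nat) (hk : k < L.length), i ≤ k → pvIsOn bit L[k] = false) :
    pvMoveLoop bit L i = L := by
  rw [pvMoveLoop]
  by_cases hi : i < L.length
  · rw [dif_pos hi, h i hi (le_refl i)]
    simp only [Bool.false_eq_true, if_false]
    exact pvMoveLoop_id bit L (i + 1) (fun k hk hik => h k hk (by omega))
  · rw [dif_neg hi]
  termination_by L.length - i
  decreasing_by omega

theorem pv_eraseIdx_mid (l₁ : List Int) (x : Int) (l₂ : List Int) :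
    (l₁ ++ x :: l₂).eraseIdx l₁.length = l₁ ++ l₂ := by
  induction l₁ with
  | nil => rfl
  | cons a l₁ ih => simp [List.eraseIdx_cons_succ, ih]

theorem pv_getElem_mid (l₁ : List Int) (x : Int) (l₂ : List Int) :
    (l₁ ++ x :: l₂)[l₁.length]'(by simp) = x := by
  rw [List.getElem_append_right (le_refl _)]
  simp

theorem pvMoveLoop_move (bit : Int) (l₁ : List Int) (x : Int) (l₂ : List Int)
    (h1 : ∀ y ∈ l₁, pvIsOn bit y = false) (hx : pvIsOn bit x = true)
    (h2 : ∀ y ∈ l₂, pvIsOn bit y = false) (i : Nat) (hi : i ≤ l₁.length) :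
    pvMoveLoop bit (l₁ ++ x :: l₂) i = x :: (l₁ ++ l₂) := by
  rw [pvMoveLoop]
  by_cases hcase : i < l₁.length
  · have hil : i < (l₁ ++ x :: l₂).length := by simp; omega
    rw [dif_pos hil]
    have hget : (l₁ ++ x :: l₂)[i]'hil = l₁[i]'hcase := List.getElem_append_left hcase
    rw [hget, h1 _ (List.getElem_mem hcase)]
    simp only [Bool.false_eq_true, if_false]
    exact pvMoveLoop_move bit l₁ x l₂ h1 hx h2 (i + 1) (by omega)
  · have hieq : i = l₁.length := by omega
    subst hieq
    have hil : l₁.length < (l₁ ++ x :: l₂).length := by simp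
    rw [dif_pos hil]
    rw [pv_getElem_mid l₁ x l₂, hx]
    simp only [if_true]
    have hxmem : x ∈ l₁ ++ x :: l₂ := by simp
    rw [PySem.List.remove?_eq_some_erase _ x hxmem, Option.getD_some]
    have hx1 : x ∉ l₁ := by
      intro hmem
      rw [h1 x hmem] at hx
      exact absurd hx (by simp)
    rw [List.erase_append_right _ hx1, List.erase_cons_head, PySem.List.insert_zero]
    apply pvMoveLoop_id
    intro k hk hik
    obtain ⟨j, rfl⟩ : ∃ j, k = j + 1 := ⟨k - 1, by omega⟩
    have hjlen : j < (l₁ ++ l₂).length := by simpa using hk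
    have hj2 : l₁.length ≤ j := by omega
    have : (x :: (l₁ ++ l₂))[j + 1]'hk = (l₁ ++ l₂)[j]'hjlen := by simp
    rw [this, List.getElem_append_right hj2]
    exact h2 _ (List.getElem_mem _)
  termination_by l₁.length + 1 - i
  decreasing_by omega

-- ===== VERDICT (by name: the statement is the Claim_ definition above) =====
theorem solve_spec : Claim_equal_solve := by
  intro A hDom hPre
  unfold Spec_solve
  cases hmax : PySem.List.max? A (fun y : Int => y) with
  | none => exact absurd ((PySem.List.max?_eq_none_iff A _).mp hmax) hPre
  | some mx =>
    simp only [solve, solve_alt, hmax]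
    by_cases hmx : 0 < mx
    · rw [if_pos hmx]
      have hn1 : 1 ≤ PySem.Int.bitLength mx := by
        rw [PySem.Int.bitLength_of_pos hmx]; omega
      set n : Nat := PySem.Int.bitLength mx with hn
      set counts : List Int :=
        A.foldl (fun c (x : Int) =>
          (PySem.List.enumerate c).map (fun p : Int × Int => p.2 + PySem.Int.band (x >>> p.1.toNat) 1))
          (List.replicate n (0:Int)) with hcounts
      have hcounts' : counts = A.foldl (fun acc x => pvHStep x acc) (List.replicate n (0:Int)) := rfl
      have hclen : counts.length = n := by rw [hcounts', pvHist_fold_length]; simp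
      have hcget : ∀ b : Int, 0 ≤ b → b < (n:Int) →
          PySem.List.pyGetD counts b 0 = pvTimesIsOn b A := by
        intro b hb0 hbn
        have hblt : b.toNat < n := by omega
        have hget? : counts[b.toNat]? = some ((A.countP (fun x : Int => PySem.Int.band (x >>> b.toNat) 1 == 1) : Nat) : Int) := by
          rw [hcounts', pvHist_fold_get, List.getElem?_replicate, if_pos hblt]
          simp
        have : counts[b.toNat]'(by omega) = ((A.countP (fun x : Int => PySem.Int.band (x >>> b.toNat) 1 == 1) : Nat) : Int) := by
          have := List.getElem?_eq_getElem (l := counts) (i := b.toNat) (by omega)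
          rw [this] at hget?
          exact Option.some_injective _ hget?
        rw [PySem.List.pyGetD_eq_getElem counts 0 hb0 (by omega), this, pvTimesIsOn_eq]
        rfl
      have hmsb : pvGetMsb mx = (n:Int) - 1 := pvGetMsb_eq mx hmx
      have hsel :
          ((PySem.List.pyRange ((n:Int) - 1) 0 (-1)).find?
            (fun b => PySem.List.pyGetD counts b 0 == 1)).getD 0 = pvBitLoop A ((n:Int) - 1) := by
        rw [pvBitLoop_eq_find A ((n:Int) - 1),
          pv_find?_congr _ _ (fun b => pvTimesIsOn b A == 1) ?_]
        intro b hb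
        have := PySem.List.mem_pyRange_neg_one.mp hb
        rw [hcget b (by omega) (by omega)]
      rw [hmsb, hsel]
      set bit : Int := pvBitLoop A ((n:Int) - 1) with hbit
      by_cases hb0 : bit ≠ 0
      · rw [if_pos hb0, if_pos hb0]
        have hcount : A.countP (pvIsOn bit) = 1 := by
          rw [hbit]
          exact pvBitLoop_spec A ((n:Int) - 1) (by rw [← hbit]; exact hb0)
        obtain ⟨l₁, x, l₂, hA, h1, hx, h2⟩ := pv_countP_eq_one _ _ hcount
        have hAside : pvMoveLoop bit A 0 = x :: (l₁ ++ l₂) := by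
          rw [hA]
          exact pvMoveLoop_move bit l₁ x l₂ h1 hx h2 0 (by omega)
        have hq : ∀ p ∈ PySem.List.enumerate A,
            (PySem.Int.band (p.2 >>> bit.toNat) 1 != 0) = pvIsOn bit p.2 := by
          intro p _
          rcases pv_band01 (p.2 >>> bit.toNat) with hb | hb <;> simp [pvIsOn, hb]
        have hfind : (PySem.List.enumerate A).find?
              (fun p : Int × Int => PySem.Int.band (p.2 >>> bit.toNat) 1 != 0)
            = some (((l₁.length : Int)), x) := by
          rw [pv_find?_congr _ _ (fun p : Int × Int => pvIsOn bit p.2) hq, hA]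
          have := pv_find_enum (pvIsOn bit) l₁ x l₂ 0 h1 hx
          simpa using this
        have hpop : PySem.List.pop? A ((l₁.length : Int)) = some (x, l₁ ++ l₂) := by
          rw [hA, PySem.List.pop?_natCast _ l₁.length (by simp), pv_getElem_mid, pv_eraseIdx_mid]
        rw [hAside]
        simp only [hfind, hpop, PySem.List.insert_zero]
      · rw [if_neg hb0, if_neg hb0]
    · rw [if_neg hmx]
      have h1 : pvGetMsb mx = -1 := pvGetMsb_nonpos mx (by omega)
      have h2 : pvBitLoop A (-1) = 0 := by rw [pvBitLoop, if_neg (by norm_num)]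
      rw [h1, h2]
      simp
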